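-- pv_equiv track=rewrite | github.com/austinfujimori/video_ad_gen | main.py | assign_voices
-- ===== SOURCE A (Python) =====
-- def assign_voices(parsed_scenes):
--     voices = {}
--     current_voice_index = 0
--     available_voices = ['en', 'en-us', 'en-uk', 'en-au', 'en-ca']  # Example voices, you can add more
--
--     for scene in parsed_scenes:
--         for speaker, _ in scene:
--             if speaker not in voices:
--                 voices[speaker] = available_voices[current_voice_index % len(available_voices)]
--                 current_voice_index += 1
--
--     return voices
-- ===== SOURCE B (Python) =====
-- def assign_voices(parsed_scenes):
--     available_voices = ['en', 'en-us', 'en-uk', 'en-au', 'en-ca']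
--     # flatten the speaker stream (same two-element unpack as the original)
--     stream = [speaker for scene in parsed_scenes for speaker, _ in scene]
--     # min-index map: walk the stream backwards, overwriting, so each speaker
--     # ends up mapped to its FIRST position -- no membership test, no counter
--     first = {}
--     for pos, speaker in reversed(list(enumerate(stream))):
--         first[speaker] = pos
--     # rank speakers by first appearance and assign cycling voices by rank
--     order = sorted(first, key=lambda sp: first[sp])
--     return {sp: available_voices[i % len(available_voices)]
--             for i, sp in enumerate(order)}
-- ===== Notes on version B (the rewrite author's own statement) =====
-- stated objective: alternative
-- what changed: Replaces the interleaved membership-test-plus-counter loop by a min-index algorithm: a backward overwrite pass builds a speaker->first-position map with no membership test, speakers are then sorted by that position and voices assigned by rank.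
import Mathlib
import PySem

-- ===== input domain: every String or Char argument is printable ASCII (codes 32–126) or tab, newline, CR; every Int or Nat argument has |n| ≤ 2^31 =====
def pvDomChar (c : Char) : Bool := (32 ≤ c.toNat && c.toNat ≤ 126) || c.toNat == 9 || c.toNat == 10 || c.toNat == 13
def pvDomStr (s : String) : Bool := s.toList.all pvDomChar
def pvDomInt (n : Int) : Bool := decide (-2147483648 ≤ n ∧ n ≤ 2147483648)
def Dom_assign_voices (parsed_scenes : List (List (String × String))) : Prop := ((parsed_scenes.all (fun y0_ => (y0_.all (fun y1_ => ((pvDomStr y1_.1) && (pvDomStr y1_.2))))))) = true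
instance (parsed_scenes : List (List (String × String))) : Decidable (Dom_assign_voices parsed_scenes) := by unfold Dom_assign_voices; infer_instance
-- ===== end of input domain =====

-- B replaces A's interleaved membership-test + counter loop by a min-index algorithm: a backward
-- overwrite pass maps each speaker to its first position, then speakers are sorted by that position
-- and voices assigned by rank; same result, alternative algorithm (no speed claim).

-- ===== PORT A =====
-- dict 'voices' is the association list st.1 (insertion order, keys never overwritten);
-- 'speaker not in voices' is the key-membership test; pyGet? is exact (index always in range).
def assign_voices (parsed_scenes : List (List (String × String))) : List (String × String) :=
  let available_voices : List String := ["en", "en-us", "en-uk", "en-au", "en-ca"]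
  let st : List (String × String) × Int :=
    parsed_scenes.foldl (fun st scene =>
      scene.foldl (fun (st : List (String × String) × Int) p =>
        if ¬ (st.1.map Prod.fst).contains p.1 then
          (st.1 ++ [(p.1, (PySem.List.pyGet? available_voices
                             (PySem.Int.mod st.2 (available_voices.length : Int))).getD "")],
           st.2 + 1)
        else st) st)
      ([], 0)
  st.1

-- ===== PORT B =====
-- 'reversed(list(enumerate(stream)))' = (enumerate stream).reverse; dict overwrite = Dict.insert;
-- sorted(first, key=...) sorts first.keys; 'first[sp]' is exact via getD (every key is present).
def assign_voices_alt (parsed_scenes : List (List (String × String))) : List (String × String) :=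
  let available_voices : List String := ["en", "en-us", "en-uk", "en-au", "en-ca"]
  let stream : List String := parsed_scenes.flatMap (fun scene => scene.map Prod.fst)
  let first : PySem.Dict String Int :=
    ((PySem.List.enumerate stream 0).reverse).foldl
      (fun d p => d.insert p.2 p.1) PySem.Dict.empty
  let order : List String :=
    PySem.List.sorted first.keys (fun sp => (first.get? sp).getD 0) false
  (PySem.List.enumerate order 0).map (fun p =>
    (p.2, (PySem.List.pyGet? available_voices
             (PySem.Int.mod p.1 (available_voices.length : Int))).getD ""))

-- ===== PRECONDITION & SPEC =====
def Spec_assign_voices (parsed_scenes : List (List (String × String))) (out : List (String × String)) : Prop := out = assign_voices_alt parsed_scenes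
instance (parsed_scenes : List (List (String × String))) (out : List (String × String)) : Decidable (Spec_assign_voices parsed_scenes out) := by unfold Spec_assign_voices; infer_instance

-- ===== CLAIM (what is proved, stated in full; the proofs are below) =====
def Claim_equal_assign_voices : Prop := ∀ (parsed_scenes : List (List (String × String))), Dom_assign_voices parsed_scenes → Spec_assign_voices parsed_scenes (assign_voices parsed_scenes)

-- ===== LEMMAS AND PROOFS =====

def pvVoiceOf (i : Int) : String :=
  (PySem.List.pyGet? ["en", "en-us", "en-uk", "en-au", "en-ca"]
     (PySem.Int.mod i ((["en", "en-us", "en-uk", "en-au", "en-ca"] : List String).length : Int))).getD ""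

def pvStepA (st : List (String × String) × Int) (s : String) : List (String × String) × Int :=
  if ¬ (st.1.map Prod.fst).contains s then (st.1 ++ [(s, pvVoiceOf st.2)], st.2 + 1) else st

def pvAssign (acc : List String) : List (String × String) :=
  (PySem.List.enumerate acc 0).map (fun p => (p.2, pvVoiceOf p.1))

theorem pvAssign_map_fst (acc : List String) : (pvAssign acc).map Prod.fst = acc := by
  simp [pvAssign, List.map_map, Function.comp_def, PySem.List.map_snd_enumerate]

theorem pvAssign_append (acc : List String) (x : String) :
    pvAssign (acc ++ [x]) = pvAssign acc ++ [(x, pvVoiceOf (acc.length : Int))] := by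
  simp [pvAssign, PySem.List.enumerate_append, PySem.List.enumerate_cons, PySem.List.enumerate_nil]

theorem pv_flat (ps : List (List (String × String))) (st : List (String × String) × Int) :
    ps.foldl (fun st scene => scene.foldl (fun st p => pvStepA st p.1) st) st
      = (ps.flatMap (fun scene => scene.map Prod.fst)).foldl pvStepA st := by
  induction ps generalizing st with
  | nil => rfl
  | cons sc ps ih =>
      simp only [List.foldl_cons, List.flatMap_cons, List.foldl_append, ih, List.foldl_map]

-- A's main loop computes pvAssign of the first-appearance dedup of the speaker stream
theorem pv_key (xs : List String) (acc : List String) :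
    xs.foldl pvStepA (pvAssign acc, (acc.length : Int))
      = (pvAssign (xs.foldl PySem.Set.add acc), ((xs.foldl PySem.Set.add acc).length : Int)) := by
  induction xs generalizing acc with
  | nil => rfl
  | cons x xs ih =>
      simp only [List.foldl_cons]
      by_cases h : x ∈ acc
      · have hs : pvStepA (pvAssign acc, (acc.length : Int)) x = (pvAssign acc, (acc.length : Int)) := by
          simp only [pvStepA, pvAssign_map_fst]
          simp [h]
        have hd : PySem.Set.add acc x = acc := by simp [PySem.Set.add, h]
        rw [hs, hd, ih]
      · have hs : pvStepA (pvAssign acc, (acc.length : Int)) x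
            = (pvAssign (acc ++ [x]), ((acc ++ [x]).length : Int)) := by
          simp only [pvStepA, pvAssign_map_fst]
          simp [h, pvAssign_append]
        have hd : PySem.Set.add acc x = acc ++ [x] := by simp [PySem.Set.add, h]
        rw [hs, hd, ih]

-- get? of a fold of inserts = last write wins
theorem pv_get?_foldl_insert (l : List (Int × String)) (d : PySem.Dict String Int) (k : String) :
    (l.foldl (fun d p => d.insert p.2 p.1) d).get? k
      = match l.reverse.find? (fun p => p.2 == k) with
        | some p => some p.1
        | none => d.get? k := by
  induction l generalizing d with
  | nil => rfl
  | cons x l ih =>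
      simp only [List.foldl_cons, List.reverse_cons, List.find?_append, ih]
      cases hf : l.reverse.find? (fun p => p.2 == k) with
      | some p => simp
      | none =>
          simp only [Option.none_or]
          by_cases hk : k = x.2
          · subst hk; simp [PySem.Dict.get?_insert_self]
          · have hne : (x.2 == k) = false := by
              simp only [beq_eq_false_iff_ne, ne_eq]
              exact fun h => hk h.symm
            simp [List.find?, PySem.Dict.get?_insert_of_ne _ _ hk, hne]

theorem pv_find?_enumerate (xs : List String) (k : String) (h : k ∈ xs) (s : Int) :
    (PySem.List.enumerate xs s).find? (fun p => p.2 == k) = some (s + (xs.idxOf k : Int), k) := by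
  induction xs generalizing s with
  | nil => cases h
  | cons x xs ih =>
      rw [PySem.List.enumerate_cons]
      by_cases hx : x = k
      · subst hx; simp [List.find?, List.idxOf_cons_self]
      · have hm : k ∈ xs := by cases h with | head => exact absurd rfl hx | tail _ h => exact h
        have : (x == k) = false := by simp [hx]
        simp only [List.find?, this, ih hm (s + 1), List.idxOf_cons_ne _ hx]
        exact congrArg some (Prod.ext (by push_cast; ring) rfl)

-- first-appearance dedup, one step
theorem pv_foldl_add_eq (xs : List String) (acc : List String) :
    xs.foldl PySem.Set.add acc
      = acc ++ (PySem.List.dedup xs).filter (fun y => !acc.contains y) := by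
  induction xs generalizing acc with
  | nil => simp [PySem.List.dedup]
  | cons x xs ih =>
      have hded : PySem.List.dedup (x :: xs)
          = [x] ++ (PySem.List.dedup xs).filter (fun y => !([x] : List String).contains y) := by
        rw [PySem.List.dedup_eq_ofList, PySem.Set.ofList_eq_foldl]
        simpa [PySem.Set.add] using ih (acc := [x])
      rw [List.foldl_cons, hded]
      by_cases h : x ∈ acc
      · have hadd : PySem.Set.add acc x = acc := by simp [PySem.Set.add, h]
        rw [hadd, ih]
        congr 1
        simp only [List.filter_append, List.filter_filter]
        have hx : (([x] : List String).filter (fun y => !acc.contains y)) = [] := by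
          simp [List.filter, h]
        rw [hx, List.nil_append]
        apply List.filter_congr
        intro y _
        by_cases hy : y ∈ acc
        · simp [hy]
        · have hyx : y ≠ x := fun he => hy (he ▸ h)
          simp [hy, hyx]
      · have hadd : PySem.Set.add acc x = acc ++ [x] := by simp [PySem.Set.add, h]
        rw [hadd, ih]
        simp only [List.filter_append, List.filter_filter, List.append_assoc]
        congr 1
        have hx : (([x] : List String).filter (fun y => !acc.contains y)) = [x] := by
          simp [List.filter, h]
        rw [hx]
        congr 1
        apply List.filter_congr
        intro y _
        by_cases hyx : y = x
        · subst hyx; simp [h]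
        · have : (y == x) = false := by simp [hyx]
          simp [this, List.contains_append]

theorem pv_dedup_cons (x : String) (xs : List String) :
    PySem.List.dedup (x :: xs)
      = x :: (PySem.List.dedup xs).filter (fun y => !(y == x)) := by
  rw [PySem.List.dedup_eq_ofList, PySem.Set.ofList_eq_foldl, List.foldl_cons]
  have hadd : PySem.Set.add ([] : List String) x = [x] := by simp [PySem.Set.add]
  rw [hadd, pv_foldl_add_eq]
  simp only [List.cons_append, List.nil_append, List.cons.injEq, true_and]
  apply List.filter_congr
  intro y _
  by_cases hy : y = x <;> simp [hy]

-- the dedup list is strictly increasing in first-occurrence index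
theorem pv_dedup_pairwise_idxOf (xs : List String) :
    (PySem.List.dedup xs).Pairwise (fun a b => xs.idxOf a < xs.idxOf b) := by
  induction xs with
  | nil => simp [PySem.List.dedup]
  | cons x xs ih =>
      rw [pv_dedup_cons]
      refine List.Pairwise.cons ?_ ?_
      · intro b hb
        have hbx : (b == x) = false := by
          have := List.of_mem_filter hb
          simpa using this
        have hbx' : b ≠ x := by simpa using hbx
        rw [List.idxOf_cons_self, List.idxOf_cons_ne _ (by simpa using fun he => hbx' he.symm)]
        omega
      · refine (ih.sublist List.filter_sublist).imp_of_mem ?_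
        intro a b ha hb hab
        have hax : x ≠ a := fun he => by simpa [he] using List.of_mem_filter ha
        have hbx : x ≠ b := fun he => by simpa [he] using List.of_mem_filter hb
        rw [List.idxOf_cons_ne _ hax, List.idxOf_cons_ne _ hbx]
        omega

-- B's dict/sort pipeline recovers the first-appearance dedup order
theorem pv_order_eq (stream : List String) :
    PySem.List.sorted
      (((PySem.List.enumerate stream 0).reverse).foldl (fun d p => d.insert p.2 p.1)
         (PySem.Dict.empty (κ := String) (ν := Int))).keys
      (fun sp =>
        ((((PySem.List.enumerate stream 0).reverse).foldl (fun d p => d.insert p.2 p.1)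
            (PySem.Dict.empty (κ := String) (ν := Int))).get? sp).getD 0) false
      = PySem.List.dedup stream := by
  have hkeys : (((PySem.List.enumerate stream 0).reverse).foldl (fun d p => d.insert p.2 p.1)
      (PySem.Dict.empty (κ := String) (ν := Int))).keys = PySem.List.dedup stream.reverse := by
    rw [PySem.Dict.keys_foldl_insert_key ((PySem.List.enumerate stream 0).reverse)
          (fun p : Int × String => p.2) (fun _ p => p.1) PySem.Dict.empty]
    have hm : ((PySem.List.enumerate stream 0).reverse).map (fun p : Int × String => p.2)
        = stream.reverse := by
      rw [List.map_reverse]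
      rw [show ((PySem.List.enumerate stream 0).map (fun p : Int × String => p.2)) = stream from
        PySem.List.map_snd_enumerate stream 0]
    rw [hm, PySem.Dict.keys_empty, PySem.List.dedup_eq_ofList]
    rfl
  have hget : ∀ k ∈ stream,
      (((PySem.List.enumerate stream 0).reverse).foldl (fun d p => d.insert p.2 p.1)
        (PySem.Dict.empty (κ := String) (ν := Int))).get? k = some ((stream.idxOf k : Int)) := by
    intro k hk
    rw [pv_get?_foldl_insert, List.reverse_reverse, pv_find?_enumerate stream k hk 0]
    simp
  apply PySem.List.sorted_eq_of_perm_of_pairwise_lt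
  · rw [hkeys]
    refine (List.perm_ext_iff_of_nodup (PySem.List.nodup_dedup _) (PySem.List.nodup_dedup _)).mpr ?_
    intro a
    rw [PySem.List.mem_dedup, PySem.List.mem_dedup, List.mem_reverse]
  · refine (pv_dedup_pairwise_idxOf stream).imp_of_mem ?_
    intro a b ha hb hab
    have ha' : a ∈ stream := (PySem.List.mem_dedup _ _).mp ha
    have hb' : b ∈ stream := (PySem.List.mem_dedup _ _).mp hb
    rw [hget a ha', hget b hb']
    simpa using hab

-- ===== VERDICT (by name: the statement is the Claim_ definition above) =====
theorem assign_voices_spec : Claim_equal_assign_voices := by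
  intro ps _
  show assign_voices ps = assign_voices_alt ps
  have hA : assign_voices ps
      = (ps.foldl (fun st scene => scene.foldl (fun st p => pvStepA st p.1) st)
          (pvAssign [], (([] : List String).length : Int))).1 := rfl
  have hB : assign_voices_alt ps
      = pvAssign (PySem.List.sorted
          (((PySem.List.enumerate (ps.flatMap (fun scene => scene.map Prod.fst)) 0).reverse).foldl
             (fun d p => d.insert p.2 p.1) (PySem.Dict.empty (κ := String) (ν := Int))).keys
          (fun sp =>
            ((((PySem.List.enumerate (ps.flatMap (fun scene => scene.map Prod.fst)) 0).reverse).foldl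
                (fun d p => d.insert p.2 p.1) (PySem.Dict.empty (κ := String) (ν := Int))).get? sp).getD 0)
          false) := rfl
  rw [hA, pv_flat, pv_key, hB, pv_order_eq, ← PySem.Set.ofList_eq_foldl, ← PySem.List.dedup_eq_ofList]
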